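-- pv_equiv track=rewrite | github.com/lge0322/F2021_public | 15112-F21/Week5/hw5.py | isSquareQualified
-- ===== SOURCE A (Python) =====
-- def isSquareQualified(a):
--     #condition
--     #1: non-empty
--     #2: square (rows = cols) v
--     #3: if a[i][j] != int: return False
--     #4: every int should be unique
--     if (len(a) == 1) and (isinstance(a[0], int)): return False
--     row = len(a)
--     col = len(a[0])
--     result = []
--     if (row != col): return False
--     for i in range(row):
--         if len(a[i]) != len(a[0]):
--             return False
--     for i in range(row):
--         for j in range(col):
--             result.append(a[i][j])
--             if a[i][j] == None:
--                 return False
--             if not isinstance(a[i][j],int):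
--                 return False
--     for k in range(len(result)):
--         if result.count(result[k]) > 1:
--             return False
--     return True
-- ===== SOURCE B (Python) =====
-- def isSquareQualified(a):
--     n = len(a)
--     cells = []
--     for row in a:
--         if len(row) != n:
--             return False
--         for x in row:
--             if x is None or not isinstance(x, int):
--                 return False
--             cells.append(x)
--     cells.sort()
--     for p, q in zip(cells, cells[1:]):
--         if p == q:
--             return False
--     return True
-- ===== Notes on version B (the rewrite author's own statement) =====
-- stated objective: alternative
-- what changed: Single fused pass over rows checks shape and cell types while collecting cells, then uniqueness is decided by sorting the cells once and scanning adjacent pairs, instead of A's staged index-driven passes with a result.count rescan per cell.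
import Mathlib
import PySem

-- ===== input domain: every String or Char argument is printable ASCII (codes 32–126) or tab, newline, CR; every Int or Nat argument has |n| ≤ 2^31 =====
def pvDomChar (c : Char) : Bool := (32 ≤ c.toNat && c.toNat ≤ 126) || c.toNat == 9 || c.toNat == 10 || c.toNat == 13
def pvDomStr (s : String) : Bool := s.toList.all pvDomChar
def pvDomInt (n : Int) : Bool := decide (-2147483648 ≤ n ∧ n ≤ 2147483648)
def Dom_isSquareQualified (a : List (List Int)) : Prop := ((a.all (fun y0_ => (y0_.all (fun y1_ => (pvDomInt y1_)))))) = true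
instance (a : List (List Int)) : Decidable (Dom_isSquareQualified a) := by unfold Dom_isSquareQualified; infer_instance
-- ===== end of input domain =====

-- B fuses shape/type checking and cell collection into one pass over rows, then decides
-- uniqueness by sorting the cells once and scanning adjacent pairs, instead of A's staged
-- index passes with a result.count rescan per cell (objective: alternative).

-- ===== PORT A =====
-- Python's first guard `len(a) == 1 and isinstance(a[0], int)` can never fire under the type
-- convention (a[0] is a list, never an int), so the port omits that always-false branch.
-- The `a[i][j] == None` and `not isinstance(a[i][j], int)` tests likewise never fire on Int cells.
def isSquareQualified (a : List (List Int)) : Bool :=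
  let row : Int := PySem.List.len a
  let col : Int := PySem.List.len (PySem.List.pyGetD a 0 [])   -- a[0]; IndexError on [] is excluded by Pre_
  if row ≠ col then false
  else if (PySem.List.pyRange 0 row).any
            (fun i => PySem.List.len (PySem.List.pyGetD a i []) ≠ col) then false
  else
    let result := (PySem.List.pyRange 0 row).foldl (fun acc i =>
      (PySem.List.pyRange 0 col).foldl (fun acc2 j =>
        acc2 ++ [PySem.List.pyGetD (PySem.List.pyGetD a i []) j 0]) acc) []
    !((PySem.List.pyRange 0 (PySem.List.len result)).any
        (fun k => PySem.List.count result (PySem.List.pyGetD result k 0) > 1))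

-- ===== PORT B =====
-- B's `x is None or not isinstance(x, int)` test never fires on Int cells, so the port's
-- row loop only checks the row length and appends the cells; `cells[1:]` on a list is drop 1.
def isSquareQualified_alt (a : List (List Int)) : Bool :=
  let n : Int := PySem.List.len a
  if a.any (fun row => PySem.List.len row ≠ n) then false
  else
    let cells := PySem.List.sorted (a.foldl (fun acc row => acc ++ row) []) (fun x => x) false
    !((cells.zip (cells.drop 1)).any (fun pq => pq.1 == pq.2))

-- ===== PRECONDITION & SPEC =====
-- Pre_ excludes only the empty list, on which Python A raises IndexError at `len(a[0])`.
def Pre_isSquareQualified (a : List (List Int)) : Prop := a ≠ []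
instance (a : List (List Int)) : Decidable (Pre_isSquareQualified a) := by
  unfold Pre_isSquareQualified; infer_instance
def pvWitness_isSquareQualified : List (List Int) := [[1, 2], [3, 4]]

def Spec_isSquareQualified (a : List (List Int)) (out : Bool) : Prop := out = isSquareQualified_alt a
instance (a : List (List Int)) (out : Bool) : Decidable (Spec_isSquareQualified a out) := by
  unfold Spec_isSquareQualified; infer_instance

-- ===== CLAIM (what is proved, stated in full; the proofs are below) =====
def Claim_equal_isSquareQualified : Prop := ∀ (a : List (List Int)), Dom_isSquareQualified a → Pre_isSquareQualified a → Spec_isSquareQualified a (isSquareQualified a)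

-- ===== LEMMAS AND PROOFS =====

lemma pv_any_getD_range {α : Type} (a : List α) (d : α) (p : α → Bool) :
    (List.range a.length).any (fun k => p (a.getD k d)) = a.any p := by
  rw [Bool.eq_iff_iff]
  simp only [List.any_eq_true, List.mem_range]
  constructor
  · rintro ⟨k, hk, hp⟩
    rw [List.getD_eq_getElem _ _ hk] at hp
    exact ⟨a[k], List.getElem_mem hk, hp⟩
  · rintro ⟨x, hx, hp⟩
    obtain ⟨k, hk, rfl⟩ := List.mem_iff_getElem.mp hx
    exact ⟨k, hk, by rw [List.getD_eq_getElem _ _ hk]; exact hp⟩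

-- adjacent-pair scan of a ≤-sorted list detects exactly the duplicates
lemma pv_adj : ∀ (s : List Int), s.Pairwise (· ≤ ·) →
    ((((s.zip (s.drop 1)).any (fun pq => pq.1 == pq.2)) = false) ↔ s.Nodup) := by
  intro s
  induction s with
  | nil => simp
  | cons x t ih =>
    intro hp
    cases t with
    | nil => simp
    | cons y u =>
      have hpt := hp.of_cons
      have hxy : x ≤ y := (List.pairwise_cons.mp hp).1 y List.mem_cons_self
      have hyu : ∀ z ∈ u, y ≤ z := fun z hz => (List.pairwise_cons.mp hpt).1 z hz
      simp only [List.drop_succ_cons, List.drop_zero, List.zip_cons_cons, List.any_cons,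
        Bool.or_eq_false_iff, beq_eq_false_iff_ne, ne_eq] at *
      rw [ih hpt]
      constructor
      · rintro ⟨hne, hnd⟩
        refine List.nodup_cons.mpr ⟨?_, hnd⟩
        intro hx
        rcases List.mem_cons.mp hx with h | h
        · exact hne h
        · exact hne (le_antisymm hxy (hyu x h))
      · intro hnd
        exact ⟨fun h => (List.nodup_cons.mp hnd).1 (h ▸ List.mem_cons_self),
               (List.nodup_cons.mp hnd).2⟩

lemma pv_take_foldl (a : List (List Int)) : ∀ n, n ≤ a.length →
    (List.range n).foldl (fun acc k => acc ++ a.getD k []) [] = (a.take n).flatten := by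
  intro n
  induction n with
  | zero => intro _; simp
  | succ m ih =>
    intro h
    have hm : m < a.length := by omega
    rw [List.range_succ, List.foldl_append, ih (by omega)]
    show (List.take m a).flatten ++ a.getD m [] = (List.take (m + 1) a).flatten
    rw [List.getD_eq_getElem _ _ hm, ← List.take_concat_get (h := hm),
      List.concat_eq_append, List.flatten_append]
    simp

lemma pv_flatten (a : List (List Int)) (c : Nat) (h : ∀ row ∈ a, row.length = c) :
    (PySem.List.pyRange 0 (a.length : Int)).foldl
      (fun acc i => (PySem.List.pyRange 0 (c : Int)).foldl
        (fun acc2 j => acc2 ++ [PySem.List.pyGetD (PySem.List.pyGetD a i []) j 0]) acc) []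
    = a.flatten := by
  rw [PySem.List.foldl_congr_mem _ _ (fun acc i => acc ++ PySem.List.pyGetD a i []) _ ?_]
  · rw [PySem.List.pyRange_zero_natCast, List.foldl_map]
    simp only [PySem.List.pyGetD_natCast]
    rw [pv_take_foldl a a.length le_rfl, List.take_length]
  · intro acc i hi
    rw [PySem.List.mem_pyRange_one] at hi
    have hin : PySem.Raise.InRange a.length i := by
      simp only [PySem.Raise.InRange]; omega
    have hc : (PySem.List.pyGetD a i []).length = c :=
      h _ (PySem.List.pyGetD_mem _ _ hin)
    rw [PySem.List.foldl_append_singleton_eq_map]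
    congr 1
    rw [← hc, ← PySem.List.len_eq, PySem.List.map_pyGetD_pyRange_zero]

-- ===== VERDICT (by name: the statement is the Claim_ definition above) =====
theorem isSquareQualified_spec : Claim_equal_isSquareQualified := by
  intro a _ hpre
  unfold Spec_isSquareQualified
  match a, hpre with
  | r :: rs, _ =>
  simp only [isSquareQualified, isSquareQualified_alt, PySem.List.len_eq,
    PySem.List.pyGetD_zero_cons, ne_eq, decide_not]
  by_cases hsq : (r :: rs).length = r.length
  · rw [if_neg (not_not_intro (by exact_mod_cast hsq))]
    have hA2 : ((PySem.List.pyRange 0 ((r :: rs).length : Int)).any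
          (fun i => !decide ((((PySem.List.pyGetD (r :: rs) i []).length : Int)) = (r.length : Int))))
        = ((r :: rs).any fun row => !decide ((row.length : Int) = ((r :: rs).length : Int))) := by
      rw [PySem.List.pyRange_zero_natCast, List.any_map]
      simp only [Function.comp_def, PySem.List.pyGetD_natCast]
      rw [pv_any_getD_range (r :: rs) [] (fun row => !decide ((row.length : Int) = (r.length : Int)))]
      rw [hsq]
    rw [hA2]
    by_cases hrag : ((r :: rs).any fun row => !decide ((row.length : Int) = ((r :: rs).length : Int))) = true
    · rw [if_pos hrag, if_pos hrag]
    · rw [if_neg hrag, if_neg hrag]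
      have hrows : ∀ row ∈ (r :: rs), row.length = r.length := by
        intro row hrow
        have h1 : ((row.length : Int)) = ((r :: rs).length : Int) := by
          by_contra hne
          exact hrag (List.any_eq_true.mpr ⟨row, hrow, by simpa using hne⟩)
        have : row.length = (r :: rs).length := by exact_mod_cast h1
        omega
      rw [pv_flatten (r :: rs) r.length hrows]
      have hfold : ((r :: rs).foldl (fun acc row => acc ++ row) ([] : List Int))
          = (r :: rs).flatten := by
        rw [PySem.List.foldl_append_eq_flatten]; simp
      rw [hfold]
      set flat := (r :: rs).flatten with hflat
      -- A side: no k with count > 1  ↔  flat.Nodup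
      rw [PySem.List.pyRange_zero_natCast, List.any_map]
      simp only [Function.comp_def, PySem.List.pyGetD_natCast]
      rw [pv_any_getD_range flat 0 (fun x => decide (PySem.List.count flat x > 1))]
      -- B side: adjacent scan of the sorted cells  ↔  flat.Nodup
      rw [Bool.eq_iff_iff]
      simp only [Bool.not_eq_eq_eq_not, Bool.not_true]
      have hB := pv_adj (PySem.List.sorted flat (fun x => x) false)
        (PySem.List.sorted_pairwise flat (fun x => x))
      rw [(PySem.List.sorted_perm flat (fun x => x) false).nodup_iff] at hB
      constructor
      · intro h
        apply hB.mpr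
        rw [List.nodup_iff_count_le_one]
        intro x
        by_cases hx : x ∈ flat
        · have := List.any_eq_false.mp h x hx
          simp only [PySem.List.count_eq, decide_eq_true_eq, not_lt] at this ⊢
          omega
        · simp [List.count_eq_zero_of_not_mem hx]
      · intro h
        have hnd := hB.mp h
        rw [List.nodup_iff_count_le_one] at hnd
        refine List.any_eq_false.mpr fun x hx => ?_
        have := hnd x
        simp only [PySem.List.count_eq, decide_eq_true_eq, not_lt]
        omega
  · rw [if_pos (by exact_mod_cast hsq)]
    have hb : ((r :: rs).any fun row => !decide ((row.length : Int) = ((r :: rs).length : Int))) = true := by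
      refine List.any_eq_true.mpr ⟨r, List.mem_cons_self, ?_⟩
      simp only [Bool.not_eq_true', decide_eq_false_iff_not]
      intro h
      exact hsq (by exact_mod_cast h.symm)
    rw [if_pos hb]
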